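-- pv_equiv track=rewrite | github.com/NicolasBuehringer/test_final_project | scraper01.py | poll_to_year
-- ===== SOURCE A (Python) =====
-- months_dict = {
--     "Jan": "01",
--     "Feb": "02",
--     "Mar": "03",
--     "Apr": "04",
--     "May": "05",
--     "Jun": "06",
--     "Jul": "07",
--     "Aug": "08",
--     "Sep": "09",
--     "Okt": "10",
--     "Nov": "11",
--     "Dec": "12"
-- }
--
-- days_dict = {
--     "Jan": "31",
--     "Feb": "28",
--     "Mar": "31",
--     "Apr": "30",
--     "May": "31",
--     "Jun": "30",
--     "Jul": "31",
--     "Aug": "31",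
--     "Sep": "30",
--     "Okt": "31",
--     "Nov": "30",
--     "Dec": "31"
-- }
--
-- def poll_to_year(year_dataframe):
--     year = []
--     #iterate over each poll timeframe
--     for poll in year_dataframe:
--         dates = []
--         month = []
--
--         # iterate over each element in a poll timeframe
--         for element in poll:
--
--             # check if element is a date
--             if len(element) == 2 or len(element) == 1:
--                 dates.append(int(element))
--
--             # check if element is a month
--             if len(element) == 3:
--                 month.append(element)
--
--         # if poll was conducted on one single day
--         if len(dates) == 1:
--             #append poll day to year list as a list through split()
--             year.append(f"{dates[0]}/{months_dict[month[0]]}/2021".split())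
--
--         else:
--             # try to get all dates on which the poll was conducted
--             x = list(range(dates[0], (int(dates[1]) + 1)))
--
--             sub_list = []
--
--             # check if x is valid range
--             if x:
--
--                 #iterate over alls days and append them as a list with theirs month as digits and the year to a normal dd/mm/yyyy syntax
--                 for date in x:
--                     sub_list.append(f"{date}/{months_dict[month[0]]}/2021")
--
--                 #append list of lists for one poll to the year list
--                 year.append(sub_list)
--
--             # if the poll was conducted in two month x is  an empty list and thus False ->this will be executed
--             else:
--
--                 # get the dates of the polls in the first month
--                 dates_first_month = range(dates[0],
--                                           (int(days_dict[month[0]]) + 1))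
--
--                 #append each day in formant dd/mm/yyyy as a list to sub_list
--                 for date in dates_first_month:
--                     sub_list.append(f"{date}/{months_dict[month[0]]}/2021")
--
--                 # get the dates of the polls in the second month
--                 dates_second_month = range(1, (dates[1] + 1))
--
--                 #append each day in formant dd/mm/yyyy as a list to sub_list
--                 for date in dates_second_month:
--                     sub_list.append(f"{date}/{months_dict[month[1]]}/2021")
--
--                 #append list of lists to years
--                 year.append(sub_list)
--
--     return year
-- ===== SOURCE B (Python) =====
-- months_dict = {
--     "Jan": "01", "Feb": "02", "Mar": "03", "Apr": "04", "May": "05",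
--     "Jun": "06", "Jul": "07", "Aug": "08", "Sep": "09", "Okt": "10",
--     "Nov": "11", "Dec": "12"
-- }
--
-- days_dict = {
--     "Jan": "31", "Feb": "28", "Mar": "31", "Apr": "30", "May": "31",
--     "Jun": "30", "Jul": "31", "Aug": "31", "Sep": "30", "Okt": "31",
--     "Nov": "30", "Dec": "31"
-- }
--
--
-- def _classify(poll):
--     # one reversed scan, prepending, so dates/month come out in original order
--     dates, month = [], []
--     for e in reversed(poll):
--         if len(e) == 3:
--             month = [e] + month
--         if len(e) in (1, 2):
--             dates = [int(e)] + dates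
--     return dates, month
--
--
-- def _countdown(lo, hi, m, acc):
--     # prepend days hi, hi-1, ..., lo in front of acc (built back-to-front)
--     if hi < lo:
--         return acc
--     return _countdown(lo, hi - 1, m, [f"{hi}/{months_dict[m]}/2021"] + acc)
--
--
-- def poll_to_year(year_dataframe):
--     year = []
--     for poll in year_dataframe:
--         dates, month = _classify(poll)
--         if len(dates) == 1:
--             sub = _countdown(dates[0], dates[0], month[0], [])
--         elif dates[0] <= dates[1]:
--             sub = _countdown(dates[0], dates[1], month[0], [])
--         else:  # poll spans two months: second month's tail is the accumulator
--             sub = _countdown(dates[0], int(days_dict[month[0]]), month[0],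
--                              _countdown(1, dates[1], month[1], []))
--         year.append(sub)
--     return year
-- ===== Notes on version B (the rewrite author's own statement) =====
-- stated objective: alternative
-- what changed: B builds every poll's date list back-to-front: a recursive countdown from the last day that prepends onto an accumulator (the cross-month case simply passes the second month's list as the accumulator of the first), with tokens classified in a single reversed prepend scan, replacing A's forward append loops and its split() trick for the single-day case.
-- outside the precondition, e.g. on poll_to_year([['Feb', '45', '0']]): A returns [[]], B raises IndexError
import Mathlib
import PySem

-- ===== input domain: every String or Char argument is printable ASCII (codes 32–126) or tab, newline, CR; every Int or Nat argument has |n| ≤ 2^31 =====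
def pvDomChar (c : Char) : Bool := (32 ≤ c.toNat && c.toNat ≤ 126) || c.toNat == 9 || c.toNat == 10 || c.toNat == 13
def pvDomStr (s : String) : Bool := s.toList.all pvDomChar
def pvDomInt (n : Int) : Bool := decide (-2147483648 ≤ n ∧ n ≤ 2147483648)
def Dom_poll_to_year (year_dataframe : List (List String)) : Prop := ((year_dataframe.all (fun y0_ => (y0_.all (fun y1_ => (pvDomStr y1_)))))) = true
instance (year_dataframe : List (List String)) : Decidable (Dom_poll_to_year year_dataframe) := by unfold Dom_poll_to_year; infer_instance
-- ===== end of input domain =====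

-- B builds each poll's date list back-to-front (recursive countdown prepending onto an
-- accumulator; the cross-month second month is just the accumulator of the first), with a
-- reversed prepend scan for classification — an alternative to A's forward append loops.

-- ===== PORT A =====
def pvMonthsDict : PySem.Dict String String := PySem.Dict.ofList
  [("Jan", "01"), ("Feb", "02"), ("Mar", "03"), ("Apr", "04"), ("May", "05"), ("Jun", "06"),
   ("Jul", "07"), ("Aug", "08"), ("Sep", "09"), ("Okt", "10"), ("Nov", "11"), ("Dec", "12")]

def pvDaysDict : PySem.Dict String String := PySem.Dict.ofList
  [("Jan", "31"), ("Feb", "28"), ("Mar", "31"), ("Apr", "30"), ("May", "31"), ("Jun", "30"),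
   ("Jul", "31"), ("Aug", "31"), ("Sep", "30"), ("Okt", "31"), ("Nov", "30"), ("Dec", "31")]

-- one iteration of A's per-poll body (helper for readability; the structure is A's)
def pollBodyA (poll : List String) : List String :=
  let dm := poll.foldl (fun (s : List Int × List String) element =>
      let s1 := if PySem.Str.len element == 2 || PySem.Str.len element == 1
                then (s.1 ++ [(PySem.Int.ofStr? element).getD 0], s.2) else s
      if PySem.Str.len element == 3 then (s1.1, s1.2 ++ [element]) else s1)
    ([], [])
  let dates := dm.1
  let month := dm.2
  if dates.length == 1 then
    PySem.Str.split₀ (PySem.Int.toStr (PySem.List.pyGetD dates 0 0) ++ "/" ++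
      pvMonthsDict.getD (PySem.List.pyGetD month 0 "") "" ++ "/2021")
  else
    let x := PySem.List.pyRange (PySem.List.pyGetD dates 0 0) ((PySem.List.pyGetD dates 1 0) + 1) 1
    if x ≠ [] then
      x.foldl (fun sub date => sub ++ [PySem.Int.toStr date ++ "/" ++
        pvMonthsDict.getD (PySem.List.pyGetD month 0 "") "" ++ "/2021"]) []
    else
      let dates_first_month := PySem.List.pyRange (PySem.List.pyGetD dates 0 0)
        ((PySem.Int.ofStr? (pvDaysDict.getD (PySem.List.pyGetD month 0 "") "")).getD 0 + 1) 1
      let sub1 := dates_first_month.foldl (fun sub date => sub ++ [PySem.Int.toStr date ++ "/" ++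
        pvMonthsDict.getD (PySem.List.pyGetD month 0 "") "" ++ "/2021"]) []
      let dates_second_month := PySem.List.pyRange 1 ((PySem.List.pyGetD dates 1 0) + 1) 1
      dates_second_month.foldl (fun sub date => sub ++ [PySem.Int.toStr date ++ "/" ++
        pvMonthsDict.getD (PySem.List.pyGetD month 1 "") "" ++ "/2021"]) sub1

def poll_to_year (year_dataframe : List (List String)) : List (List String) :=
  year_dataframe.foldl (fun year poll => year ++ [pollBodyA poll]) []

-- ===== PORT B =====
-- B's _classify: one reversed scan, prepending
def pvClassify (poll : List String) : List Int × List String :=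
  poll.reverse.foldl (fun (s : List Int × List String) e =>
    let s1 := if PySem.Str.len e == 3 then (s.1, e :: s.2) else s
    if PySem.Str.len e == 1 || PySem.Str.len e == 2
    then (((PySem.Int.ofStr? e).getD 0) :: s1.1, s1.2) else s1)
    ([], [])

-- B's _countdown: prepend days hi, hi-1, …, lo in front of acc
def pvCountdown (lo hi : Int) (m : String) (acc : List String) : List String :=
  if hi < lo then acc
  else pvCountdown lo (hi - 1) m
    ((PySem.Int.toStr hi ++ "/" ++ pvMonthsDict.getD m "" ++ "/2021") :: acc)
termination_by (hi + 1 - lo).toNat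
decreasing_by omega

def pollBodyB (poll : List String) : List String :=
  let dm := pvClassify poll
  let dates := dm.1
  let month := dm.2
  if dates.length == 1 then
    pvCountdown (PySem.List.pyGetD dates 0 0) (PySem.List.pyGetD dates 0 0)
      (PySem.List.pyGetD month 0 "") []
  else if PySem.List.pyGetD dates 0 0 ≤ PySem.List.pyGetD dates 1 0 then
    pvCountdown (PySem.List.pyGetD dates 0 0) (PySem.List.pyGetD dates 1 0)
      (PySem.List.pyGetD month 0 "") []
  else
    pvCountdown (PySem.List.pyGetD dates 0 0)
      ((PySem.Int.ofStr? (pvDaysDict.getD (PySem.List.pyGetD month 0 "") "")).getD 0)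
      (PySem.List.pyGetD month 0 "")
      (pvCountdown 1 (PySem.List.pyGetD dates 1 0) (PySem.List.pyGetD month 1 "") [])

def poll_to_year_alt (year_dataframe : List (List String)) : List (List String) :=
  year_dataframe.map pollBodyB

-- ===== PRECONDITION & SPEC =====
-- Pre_ excludes exactly the polls on which the Python A raises (a 1–2-char token that is not an
-- int, no day token, a missing or unknown month token where A's f-strings evaluate it) and the
-- cross-month corner where the second range is empty and fewer than two month tokens exist: there
-- A returns because its f-string is never evaluated, while B's month[1] access raises.
def pvPollOK (poll : List String) : Bool :=
  (poll.all (fun e => !(PySem.Str.len e == 2 || PySem.Str.len e == 1) || (PySem.Int.ofStr? e).isSome)) &&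
  (let dates := poll.filterMap (fun e =>
     if PySem.Str.len e == 2 || PySem.Str.len e == 1 then some ((PySem.Int.ofStr? e).getD 0) else none)
   let month := poll.filter (fun e => PySem.Str.len e == 3)
   !dates.isEmpty &&
   (if dates.length == 1 then
      !month.isEmpty && pvMonthsDict.contains (PySem.List.pyGetD month 0 "")
    else if PySem.List.pyGetD dates 0 0 ≤ PySem.List.pyGetD dates 1 0 then
      !month.isEmpty && pvMonthsDict.contains (PySem.List.pyGetD month 0 "")
    else
      decide (2 ≤ month.length) && pvDaysDict.contains (PySem.List.pyGetD month 0 "") &&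
      (decide (PySem.List.pyGetD dates 1 0 < 1) || pvMonthsDict.contains (PySem.List.pyGetD month 1 ""))))

def Pre_poll_to_year (year_dataframe : List (List String)) : Prop :=
  (year_dataframe.all pvPollOK) = true
instance (year_dataframe : List (List String)) : Decidable (Pre_poll_to_year year_dataframe) := by
  unfold Pre_poll_to_year; infer_instance

def pvWitness_poll_to_year : List (List String) :=
  [["7", "Jan"], ["28", "Feb", "3", "Mar"]]

def Spec_poll_to_year (year_dataframe : List (List String)) (out : List (List String)) : Prop := out = poll_to_year_alt year_dataframe
instance (year_dataframe : List (List String)) (out : List (List String)) : Decidable (Spec_poll_to_year year_dataframe out) := by unfold Spec_poll_to_year; infer_instance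

-- ===== CLAIM (what is proved, stated in full; the proofs are below) =====
def Claim_equal_poll_to_year : Prop := ∀ (year_dataframe : List (List String)), Dom_poll_to_year year_dataframe → Pre_poll_to_year year_dataframe → Spec_poll_to_year year_dataframe (poll_to_year year_dataframe)

-- ===== LEMMAS AND PROOFS =====

lemma digitChar_nonspace (m : Nat) : PySem.Chars.isspace m.digitChar = false := by
  obtain h | h := lt_or_ge m 16
  · interval_cases m <;> decide
  · rw [Nat.digitChar, if_neg (by omega), if_neg (by omega), if_neg (by omega), if_neg (by omega),
      if_neg (by omega), if_neg (by omega), if_neg (by omega), if_neg (by omega), if_neg (by omega),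
      if_neg (by omega), if_neg (by omega), if_neg (by omega), if_neg (by omega), if_neg (by omega),
      if_neg (by omega), if_neg (by omega)]
    decide

-- every char printed by Nat.toDigitsCore is non-space (provided the seed list is)
lemma toDigitsCore_nonspace (b : Nat) : ∀ (fuel n : Nat) (ds : List Char),
    (∀ c ∈ ds, PySem.Chars.isspace c = false) →
    ∀ c ∈ Nat.toDigitsCore b fuel n ds, PySem.Chars.isspace c = false := by
  intro fuel
  induction fuel with
  | zero => intro n ds hds c hc; exact hds c hc
  | succ f ih =>
    intro n ds hds c hc
    rw [Nat.toDigitsCore.eq_2] at hc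
    split at hc
    · rw [List.mem_cons] at hc
      rcases hc with rfl | hc
      · exact digitChar_nonspace _
      · exact hds c hc
    · refine ih _ _ ?_ c hc
      intro c' hc'
      rw [List.mem_cons] at hc'
      rcases hc' with rfl | hc'
      · exact digitChar_nonspace _
      · exact hds c' hc'

lemma toChars_nonspace (n : Int) : ∀ c ∈ PySem.Int.toChars n, PySem.Chars.isspace c = false := by
  intro c hc
  rw [PySem.Int.toChars] at hc
  split at hc
  · rw [List.mem_cons] at hc
    rcases hc with rfl | hc
    · decide
    · exact toDigitsCore_nonspace 10 _ _ [] (by simp) c hc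
  · exact toDigitsCore_nonspace 10 _ _ [] (by simp) c hc

lemma split0_go (s cur : List Char) (acc : List (List Char)) (h : ∀ c ∈ s, PySem.Chars.isspace c = false) :
    PySem.Chars.split₀.go s cur acc =
      if cur.reverse ++ s = [] then acc.reverse else ((cur.reverse ++ s) :: acc).reverse := by
  induction s generalizing cur acc with
  | nil =>
    rw [PySem.Chars.split₀.go]
    by_cases hc : cur = [] <;> simp [hc, List.isEmpty_iff]
  | cons c rest ih =>
    rw [PySem.Chars.split₀.go]
    rw [if_neg (by simp [h c (by simp)])]
    rw [ih _ _ (fun c' hc' => h c' (by simp [hc']))]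
    simp

lemma split0_nonspace (s : List Char) (hne : s ≠ []) (h : ∀ c ∈ s, PySem.Chars.isspace c = false) :
    PySem.Chars.split₀ s = [s] := by
  rw [PySem.Chars.split₀, split0_go s [] [] h]
  simp [hne]

lemma getD_mk_mem {κ ν : Type} [BEq κ] (l : List (κ × ν)) (k : κ) (d : ν) :
    (PySem.Dict.mk l).getD k d ∈ l.map Prod.snd ++ [d] := by
  induction l with
  | nil => simp [PySem.Dict.getD, PySem.Dict.get?]
  | cons p t ih =>
    rw [PySem.Dict.getD]
    rw [show (PySem.Dict.mk (p :: t)) = PySem.Dict.mk ((p.1, p.2) :: t) by simp]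
    rw [PySem.Dict.get?_mk_cons]
    by_cases hk : (p.1 == k) = true
    · simp [hk]
    · simp only [hk]
      rw [PySem.Dict.getD] at ih
      simp only [List.map_cons, List.cons_append, List.mem_cons]
      right; exact ih

-- the looked-up month number is one of thirteen whitespace-free literals
lemma months_getD_mem (m : String) :
    pvMonthsDict.getD m "" ∈
      ["01","02","03","04","05","06","07","08","09","10","11","12",""] := by
  have h : pvMonthsDict = PySem.Dict.mk
      [("Jan", "01"), ("Feb", "02"), ("Mar", "03"), ("Apr", "04"), ("May", "05"), ("Jun", "06"),
       ("Jul", "07"), ("Aug", "08"), ("Sep", "09"), ("Okt", "10"), ("Nov", "11"), ("Dec", "12")] := by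
    decide
  rw [h]
  have h2 := getD_mk_mem
    [("Jan", "01"), ("Feb", "02"), ("Mar", "03"), ("Apr", "04"), ("May", "05"), ("Jun", "06"),
     ("Jul", "07"), ("Aug", "08"), ("Sep", "09"), ("Okt", "10"), ("Nov", "11"), ("Dec", "12")] m ""
  simp only [List.map_cons, List.map_nil] at h2
  simpa using h2

lemma fmt_nonspace (d : Int) (m : String) :
    ∀ c ∈ (PySem.Int.toStr d ++ "/" ++ pvMonthsDict.getD m "" ++ "/2021").toList,
      PySem.Chars.isspace c = false := by
  intro c hc
  simp only [String.toList_append] at hc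
  rcases List.mem_append.1 hc with hc | hc
  · rcases List.mem_append.1 hc with hc | hc
    · rcases List.mem_append.1 hc with hc | hc
      · rw [PySem.Int.toList_toStr] at hc
        exact toChars_nonspace _ c hc
      · rcases List.mem_cons.1 hc with rfl | hc
        · decide
        · simp at hc
    · have hm := months_getD_mem m
      simp only [List.mem_cons, List.not_mem_nil, or_false] at hm
      rcases hm with h | h | h | h | h | h | h | h | h | h | h | h | h <;>
        · rw [h] at hc
          fin_cases hc <;> decide
  · simp only [show ("/2021").toList = ['/', '2', '0', '2', '1'] from rfl, List.mem_cons] at hc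
    rcases hc with rfl | rfl | rfl | rfl | rfl | hc <;> first | decide | simp at hc

lemma split_fmt (d : Int) (m : String) :
    PySem.Str.split₀ (PySem.Int.toStr d ++ "/" ++ pvMonthsDict.getD m "" ++ "/2021") =
      [PySem.Int.toStr d ++ "/" ++ pvMonthsDict.getD m "" ++ "/2021"] := by
  rw [PySem.Str.split₀]
  rw [split0_nonspace _ ?_ (fmt_nonspace d m)]
  · rw [List.map_cons, List.map_nil, String.ofList_toList]
  · simp [String.toList_append]

-- A's inner classification loop computes (filterMap, filter)
lemma classify_loop (poll : List String) (d : List Int) (m : List String) :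
    poll.foldl (fun (s : List Int × List String) element =>
      let s1 := if PySem.Str.len element == 2 || PySem.Str.len element == 1
                then (s.1 ++ [(PySem.Int.ofStr? element).getD 0], s.2) else s
      if PySem.Str.len element == 3 then (s1.1, s1.2 ++ [element]) else s1) (d, m) =
    (d ++ poll.filterMap (fun e =>
        if PySem.Str.len e == 2 || PySem.Str.len e == 1 then some ((PySem.Int.ofStr? e).getD 0) else none),
     m ++ poll.filter (fun e => PySem.Str.len e == 3)) := by
  induction poll generalizing d m with
  | nil => simp
  | cons e t ih =>
    simp only [List.foldl_cons, List.filterMap_cons, List.filter_cons]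
    by_cases h2 : (PySem.Str.len e == 2 || PySem.Str.len e == 1) = true <;>
      by_cases h3 : (PySem.Str.len e == 3) = true <;>
        simp only [h2, h3, Bool.false_eq_true, reduceIte] <;>
          rw [ih] <;> simp

-- B's reversed prepend scan computes the same (filterMap, filter)
lemma classify_eq (poll : List String) :
    pvClassify poll =
      (poll.filterMap (fun e =>
        if PySem.Str.len e == 2 || PySem.Str.len e == 1 then some ((PySem.Int.ofStr? e).getD 0) else none),
       poll.filter (fun e => PySem.Str.len e == 3)) := by
  induction poll with
  | nil => rfl
  | cons e t ih =>
    have hstep : pvClassify (e :: t) =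
        (let s := pvClassify t
         let s1 := if PySem.Str.len e == 3 then (s.1, e :: s.2) else s
         if PySem.Str.len e == 1 || PySem.Str.len e == 2
         then (((PySem.Int.ofStr? e).getD 0) :: s1.1, s1.2) else s1) := by
      simp only [pvClassify, List.reverse_cons, List.foldl_append, List.foldl_cons, List.foldl_nil]
    rw [hstep, ih]
    simp only [List.filterMap_cons, List.filter_cons]
    by_cases h1 : (PySem.Str.len e == 1) = true <;>
      by_cases h2 : (PySem.Str.len e == 2) = true <;>
        by_cases h3 : (PySem.Str.len e == 3) = true <;>
          simp_all

lemma foldl_append_map {α β : Type} (f : α → β) (l : List α) (acc : List β) :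
    l.foldl (fun sub x => sub ++ [f x]) acc = acc ++ l.map f := by
  induction l generalizing acc with
  | nil => simp
  | cons x t ih => simp [List.foldl_cons, ih]

lemma pyRange_ne_nil_iff (a b : Int) : PySem.List.pyRange a (b + 1) 1 ≠ [] ↔ a ≤ b := by
  rw [PySem.List.pyRange_one]
  simp only [ne_eq, List.map_eq_nil_iff, List.range_eq_nil]
  omega

lemma pyRange_snoc (a b : Int) (h : a ≤ b) :
    PySem.List.pyRange a (b + 1) 1 = PySem.List.pyRange a b 1 ++ [b] := by
  rw [PySem.List.pyRange_one, PySem.List.pyRange_one]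
  have h1 : (b + 1 - a).toNat = (b - a).toNat + 1 := by omega
  rw [h1, List.range_succ, List.map_append, List.map_cons, List.map_nil]
  have h2 : a + ((b - a).toNat : Int) = b := by omega
  rw [h2]

-- B's countdown is the formatted range, prepended in front of the accumulator
lemma countdown_eq (lo hi : Int) (m : String) (acc : List String) :
    pvCountdown lo hi m acc =
      (PySem.List.pyRange lo (hi + 1) 1).map
        (fun d => PySem.Int.toStr d ++ "/" ++ pvMonthsDict.getD m "" ++ "/2021") ++ acc := by
  generalize hn : (hi + 1 - lo).toNat = n
  induction n generalizing hi acc with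
  | zero =>
    rw [pvCountdown, if_pos (by omega)]
    have : PySem.List.pyRange lo (hi + 1) 1 = [] := by
      rw [PySem.List.pyRange_one, hn]; rfl
    rw [this]; rfl
  | succ k ih =>
    rw [pvCountdown, if_neg (by omega)]
    rw [ih (hi - 1) _ (by omega)]
    have hle : lo ≤ hi := by omega
    rw [show hi - 1 + 1 = hi by ring, pyRange_snoc lo hi hle, List.map_append]
    simp

lemma pollBody_eq (poll : List String) : pollBodyA poll = pollBodyB poll := by
  simp only [pollBodyA, pollBodyB]
  rw [classify_loop poll [] [], classify_eq]
  simp only [List.nil_append]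
  set dates := poll.filterMap (fun e =>
      if PySem.Str.len e == 2 || PySem.Str.len e == 1 then some ((PySem.Int.ofStr? e).getD 0) else none) with hd
  set month := poll.filter (fun e => PySem.Str.len e == 3) with hmth
  by_cases h1 : (dates.length == 1) = true
  · rw [if_pos h1, if_pos h1, split_fmt, countdown_eq]
    rw [show PySem.List.pyGetD dates 0 0 + 1 = PySem.List.pyGetD dates 0 0 + 1 from rfl,
      pyRange_snoc _ _ le_rfl]
    have : PySem.List.pyRange (PySem.List.pyGetD dates 0 0) (PySem.List.pyGetD dates 0 0) 1 = [] := by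
      rw [PySem.List.pyRange_one]
      have : (PySem.List.pyGetD dates 0 0 - PySem.List.pyGetD dates 0 0).toNat = 0 := by omega
      rw [this]; rfl
    rw [this]; rfl
  · rw [if_neg h1, if_neg h1]
    by_cases hle : PySem.List.pyGetD dates 0 0 ≤ PySem.List.pyGetD dates 1 0
    · rw [if_pos hle, if_pos ((pyRange_ne_nil_iff _ _).2 hle)]
      rw [foldl_append_map, countdown_eq]
      simp
    · rw [if_neg hle]
      rw [if_neg (by simp only [ne_eq, pyRange_ne_nil_iff]; simpa using hle)]
      rw [foldl_append_map, foldl_append_map, countdown_eq, countdown_eq]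
      simp

-- ===== VERDICT (by name: the statement is the Claim_ definition above) =====
theorem poll_to_year_spec : Claim_equal_poll_to_year := by
  intro yd hd hp
  clear hd hp
  unfold Spec_poll_to_year poll_to_year poll_to_year_alt
  rw [PySem.List.foldl_append_eq_flatMap (fun p => [pollBodyA p])]
  simp [pollBody_eq]
  induction yd with
  | nil => rfl
  | cons p t ih => simp [List.flatMap_cons, ih]
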